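-- pv_equiv track=rewrite | github.com/maburgos12/pollyanas-dolce-erp | pos_bridge/services/inventory_extractor.py | _apply_branch_filter
-- ===== SOURCE A (Python) =====
-- def _apply_branch_filter(branches: list[dict], branch_filter: str | None) -> list[dict]:
--     if not branch_filter:
--         return branches
--     branch_filter_norm = branch_filter.strip().lower()
--     exact_matches = [
--         branch
--         for branch in branches
--         if branch_filter_norm == str(branch.get("value", "")).strip().lower()
--         or branch_filter_norm == str(branch.get("label", "")).strip().lower()
--     ]
--     if exact_matches:
--         return exact_matches
--     return [
--         branch
--         for branch in branches
--         if branch_filter_norm in str(branch.get("value", "")).lower()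
--         or branch_filter_norm in str(branch.get("label", "")).lower()
--     ]
-- ===== SOURCE B (Python) =====
-- def _apply_branch_filter(branches: list[dict], branch_filter: str | None) -> list[dict]:
--     if not branch_filter:
--         return branches
--     needle = branch_filter.strip().lower()
--
--     def rank(branch: dict) -> int:
--         value = str(branch.get("value", ""))
--         label = str(branch.get("label", ""))
--         if needle == value.strip().lower() or needle == label.strip().lower():
--             return 0
--         if needle in value.lower() or needle in label.lower():
--             return 1
--         return 2
--
--     ranks = [rank(branch) for branch in branches]
--     best = min(ranks, default=2)
--     if best == 2:
--         return []
--     return [branch for r, branch in zip(ranks, branches) if r == best]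
-- ===== Notes on version B (the rewrite author's own statement) =====
-- stated objective: alternative
-- what changed: B replaces A's staged filtering (an exact-match comprehension, then a substring-match comprehension only if the first is empty) with a rank-and-select algorithm: each branch is classified once into a match tier (0 exact, 1 substring, 2 none), the minimum tier is computed, and exactly the branches at that best tier are kept (empty list when the best tier is 2).
import Mathlib
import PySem

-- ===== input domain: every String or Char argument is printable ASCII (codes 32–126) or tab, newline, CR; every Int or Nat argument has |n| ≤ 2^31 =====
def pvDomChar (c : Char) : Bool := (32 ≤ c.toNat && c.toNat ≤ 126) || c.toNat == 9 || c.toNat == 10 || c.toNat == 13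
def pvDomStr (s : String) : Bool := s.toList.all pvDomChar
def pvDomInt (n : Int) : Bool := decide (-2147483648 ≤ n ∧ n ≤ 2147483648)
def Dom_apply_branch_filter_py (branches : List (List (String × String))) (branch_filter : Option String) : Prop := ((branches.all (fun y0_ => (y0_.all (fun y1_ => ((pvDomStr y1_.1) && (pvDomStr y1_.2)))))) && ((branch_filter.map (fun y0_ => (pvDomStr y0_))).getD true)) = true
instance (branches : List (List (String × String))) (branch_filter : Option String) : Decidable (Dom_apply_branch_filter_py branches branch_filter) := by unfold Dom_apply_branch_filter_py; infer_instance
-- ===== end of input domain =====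

-- B replaces A's staged filtering (exact pass, then substring pass only if empty) with a
-- rank-and-select algorithm: classify each branch into a match tier once, take the minimum
-- tier, keep the branches at that tier; objective: alternative decomposition (not faster).

-- ===== PORT A =====
-- two comprehension passes: exact matches first, substring matches only if none
def apply_branch_filter_py (branches : List (List (String × String))) (branch_filter : Option String) : List (List (String × String)) :=
  match branch_filter with
  | none => branches
  | some f =>
    if f = "" then branches
    else
      let branch_filter_norm := PySem.Str.lower (PySem.Str.strip f)
      let exact_matches := branches.filter (fun branch =>
        branch_filter_norm == PySem.Str.lower (PySem.Str.strip ((PySem.Dict.mk branch).getD "value" ""))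
        || branch_filter_norm == PySem.Str.lower (PySem.Str.strip ((PySem.Dict.mk branch).getD "label" "")))
      if exact_matches ≠ [] then exact_matches
      else branches.filter (fun branch =>
        PySem.Str.isIn branch_filter_norm (PySem.Str.lower ((PySem.Dict.mk branch).getD "value" ""))
        || PySem.Str.isIn branch_filter_norm (PySem.Str.lower ((PySem.Dict.mk branch).getD "label" "")))

-- ===== PORT B =====
-- rank each branch (0 exact, 1 substring, 2 none), take the minimum rank,
-- keep the branches whose rank equals it (empty when the best rank is 2)
def apply_branch_filter_py_alt (branches : List (List (String × String))) (branch_filter : Option String) : List (List (String × String)) :=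
  match branch_filter with
  | none => branches
  | some f =>
    if f = "" then branches
    else
      let needle := PySem.Str.lower (PySem.Str.strip f)
      let rank := fun (branch : List (String × String)) =>
        let value := (PySem.Dict.mk branch).getD "value" ""
        let label := (PySem.Dict.mk branch).getD "label" ""
        if needle == PySem.Str.lower (PySem.Str.strip value)
           || needle == PySem.Str.lower (PySem.Str.strip label) then (0 : Nat)
        else if PySem.Str.isIn needle (PySem.Str.lower value)
                || PySem.Str.isIn needle (PySem.Str.lower label) then 1
        else 2
      let ranks := branches.map rank
      let best := ranks.min?.getD 2
      if best = 2 then []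
      else ((ranks.zip branches).filter (fun p => p.1 == best)).map Prod.snd

-- ===== PRECONDITION & SPEC =====
def Spec_apply_branch_filter_py (branches : List (List (String × String))) (branch_filter : Option String) (out : List (List (String × String))) : Prop := out = apply_branch_filter_py_alt branches branch_filter
instance (branches : List (List (String × String))) (branch_filter : Option String) (out : List (List (String × String))) : Decidable (Spec_apply_branch_filter_py branches branch_filter out) := by unfold Spec_apply_branch_filter_py; infer_instance

-- ===== CLAIM (what is proved, stated in full; the proofs are below) =====
def Claim_equal_apply_branch_filter_py : Prop := ∀ (branches : List (List (String × String))) (branch_filter : Option String), Dom_apply_branch_filter_py branches branch_filter → Spec_apply_branch_filter_py branches branch_filter (apply_branch_filter_py branches branch_filter)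

-- ===== LEMMAS AND PROOFS =====

-- a foldl of Nat.min is a member of the inputs and a lower bound of them
theorem pvFoldlMinSpec (x : Nat) (xs : List Nat) :
    (xs.foldl min x ∈ x :: xs) ∧ (∀ a ∈ x :: xs, xs.foldl min x ≤ a) := by
  induction xs generalizing x with
  | nil => simp
  | cons y ys ih =>
    obtain ⟨hmem, hle⟩ := ih (min x y)
    constructor
    · simp only [List.foldl_cons]
      rcases List.mem_cons.mp hmem with h | h
      · rcases min_choice x y with hc | hc
        · rw [h, hc]; simp
        · rw [h, hc]; simp
      · simp [h]
    · intro a ha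
      simp only [List.foldl_cons]
      simp only [List.mem_cons] at ha
      rcases ha with rfl | rfl | ha
      · exact le_trans (hle (min a y) (List.mem_cons.mpr (Or.inl rfl))) (Nat.min_le_left a y)
      · exact le_trans (hle (min x a) (List.mem_cons.mpr (Or.inl rfl))) (Nat.min_le_right x a)
      · exact hle _ (by simp [ha])

-- filtering the zip of (map f xs) with xs by the rank and projecting = filtering xs directly
theorem pvZipFilterMap {α : Type} (f : α → Nat) (k : Nat) (xs : List α) :
    (((xs.map f).zip xs).filter (fun p => p.1 == k)).map Prod.snd
      = xs.filter (fun x => f x == k) := by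
  induction xs with
  | nil => rfl
  | cons x t ih =>
    simp only [List.map_cons, List.zip_cons_cons, List.filter_cons]
    by_cases h : f x = k <;> simp [h, ih]

-- the rank-and-select computation equals staged filtering, for any two predicates
theorem pvRankSelect {α : Type} (pE pS : α → Bool) (xs : List α) :
    (let rank := fun x => if pE x then (0 : Nat) else if pS x then 1 else 2
     let ranks := xs.map rank
     let best := ranks.min?.getD 2
     if best = 2 then []
     else ((ranks.zip xs).filter (fun p => p.1 == best)).map Prod.snd)
    = (if xs.filter pE ≠ [] then xs.filter pE else xs.filter pS) := by
  simp only
  set rank : α → Nat := fun x => if pE x then (0 : Nat) else if pS x then 1 else 2 with hrank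
  by_cases hE : xs.filter pE = []
  · have hEm : ∀ x ∈ xs, ¬ pE x = true := by
      intro x hx; exact (List.filter_eq_nil_iff.mp hE) x hx
    by_cases hS : xs.filter pS = []
    · -- no matches at all: best = 2 (or xs empty), both sides []
      have hSm : ∀ x ∈ xs, ¬ pS x = true := by
        intro x hx; exact (List.filter_eq_nil_iff.mp hS) x hx
      cases xs with
      | nil => simp [hE]
      | cons a t =>
        have hbest : ((a :: t).map rank).min?.getD 2 = 2 := by
          simp only [List.map_cons, List.min?, Option.getD_some]
          obtain ⟨hmem, -⟩ := pvFoldlMinSpec (rank a) (t.map rank)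
          have : ∀ b ∈ rank a :: t.map rank, b = 2 := by
            intro b hb
            simp only [List.mem_cons, List.mem_map] at hb
            rcases hb with rfl | ⟨y, hy, rfl⟩
            · simp [hrank, hEm a (by simp), hSm a (by simp)]
            · simp [hrank, hEm y (by simp [hy]), hSm y (by simp [hy])]
          exact this _ hmem
        rw [hbest, if_pos rfl]
        simp [hE, hS]
    · -- no exact matches but a substring match: best = 1, keep rank-1 = substring matches
      obtain ⟨w, hw, hwS⟩ : ∃ x ∈ xs, pS x = true := by
        by_contra h; push Not at h
        exact hS (List.filter_eq_nil_iff.mpr (by intro x hx; simpa using h x hx))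
      have hrw : rank w = 1 := by simp [hrank, hEm w hw, hwS]
      cases xs with
      | nil => simp at hw
      | cons a t =>
        have hone : (1 : Nat) ∈ (a :: t).map rank := by
          exact List.mem_map.mpr ⟨w, hw, hrw⟩
        obtain ⟨hmem, hle⟩ := pvFoldlMinSpec (rank a) (t.map rank)
        have hmin1 : (a :: t).map rank = rank a :: t.map rank := by simp
        have hbest : ((a :: t).map rank).min?.getD 2 = 1 := by
          simp only [List.map_cons, List.min?, Option.getD_some]
          have hub : (t.map rank).foldl min (rank a) ≤ 1 := hle _ (by rw [← hmin1]; exact hone)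
          have hbd : ∀ b ∈ rank a :: t.map rank, 1 ≤ b := by
            intro b hb
            rw [← hmin1] at hb
            simp only [List.mem_map] at hb
            obtain ⟨y, hy, rfl⟩ := hb
            simp only [hrank, hEm y hy, if_false, Bool.false_eq_true]
            split <;> omega
          have := hbd _ hmem
          omega
        rw [hbest, if_neg (by decide), pvZipFilterMap, if_neg (by simp [hE])]
        refine List.filter_congr ?_
        intro x hx
        have hx' : pE x = false := by simpa using hEm x hx
        simp only [hrank, hx', if_false, Bool.false_eq_true]
        by_cases h : pS x = true <;> simp [h]
  · -- some exact match: best = 0, keep rank-0 = exact matches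
    obtain ⟨w, hw, hwE⟩ : ∃ x ∈ xs, pE x = true := by
      by_contra h; push Not at h
      exact hE (List.filter_eq_nil_iff.mpr (by intro x hx; simpa using h x hx))
    have hrw : rank w = 0 := by simp [hrank, hwE]
    cases xs with
    | nil => simp at hw
    | cons a t =>
      have hzero : (0 : Nat) ∈ (a :: t).map rank := List.mem_map.mpr ⟨w, hw, hrw⟩
      obtain ⟨hmem, hle⟩ := pvFoldlMinSpec (rank a) (t.map rank)
      have hmin1 : (a :: t).map rank = rank a :: t.map rank := by simp
      have hbest : ((a :: t).map rank).min?.getD 2 = 0 := by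
        simp only [List.map_cons, List.min?, Option.getD_some]
        have := hle _ (by rw [← hmin1]; exact hzero)
        omega
      rw [hbest, if_neg (by decide), pvZipFilterMap, if_pos hE]
      refine List.filter_congr ?_
      intro x hx
      simp only [hrank]
      by_cases h : pE x = true
      · simp [h]
      · by_cases h2 : pS x = true <;> simp [h, h2]

-- ===== VERDICT (by name: the statement is the Claim_ definition above) =====
theorem apply_branch_filter_py_spec : Claim_equal_apply_branch_filter_py := by
  intro branches branch_filter _
  show apply_branch_filter_py branches branch_filter = apply_branch_filter_py_alt branches branch_filter
  cases branch_filter with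
  | none => rfl
  | some f =>
    by_cases hf : f = ""
    · simp only [apply_branch_filter_py, apply_branch_filter_py_alt, if_pos hf]
    · simp only [apply_branch_filter_py, apply_branch_filter_py_alt, if_neg hf]
      rw [pvRankSelect
        (fun branch => PySem.Str.lower (PySem.Str.strip f) == PySem.Str.lower (PySem.Str.strip ((PySem.Dict.mk branch).getD "value" ""))
          || PySem.Str.lower (PySem.Str.strip f) == PySem.Str.lower (PySem.Str.strip ((PySem.Dict.mk branch).getD "label" "")))
        (fun branch => PySem.Str.isIn (PySem.Str.lower (PySem.Str.strip f)) (PySem.Str.lower ((PySem.Dict.mk branch).getD "value" ""))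
          || PySem.Str.isIn (PySem.Str.lower (PySem.Str.strip f)) (PySem.Str.lower ((PySem.Dict.mk branch).getD "label" "")))
        branches]
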